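-- pv_equiv track=rewrite | github.com/aguswake1/Computer-Science-UBA | 1C/introduccionALaProgramacion/parcial/segundo_simulacro/solucion.py | contar_traducciones_iguales
-- ===== SOURCE A (Python) =====
-- def contar_traducciones_iguales(
--     ingles: dict[str, str], aleman: dict[str, str]
-- ) -> int:
--     res: int = 0
--     for llave, valor in ingles.items():
--         if llave in aleman.keys() and valor == aleman[llave]:
--             res += 1
--     return res
-- ===== SOURCE B (Python) =====
-- def contar_traducciones_iguales(
--     ingles: dict[str, str], aleman: dict[str, str]
-- ) -> int:
--     xs = sorted(ingles.items(), key=lambda kv: kv[0])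
--     ys = sorted(aleman.items(), key=lambda kv: kv[0])
--     i = j = 0
--     res = 0
--     while i < len(xs) and j < len(ys):
--         if xs[i][0] < ys[j][0]:
--             i += 1
--         elif ys[j][0] < xs[i][0]:
--             j += 1
--         else:
--             if xs[i][1] == ys[j][1]:
--                 res += 1
--             i += 1
--             j += 1
--     return res
-- ===== Notes on version B (the rewrite author's own statement) =====
-- stated objective: alternative
-- what changed: Replaces A's per-key hashed membership/lookup loop by a sort-then-merge: both item lists are sorted by key and a two-pointer merge counts keys present in both with equal values.
import Mathlib
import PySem

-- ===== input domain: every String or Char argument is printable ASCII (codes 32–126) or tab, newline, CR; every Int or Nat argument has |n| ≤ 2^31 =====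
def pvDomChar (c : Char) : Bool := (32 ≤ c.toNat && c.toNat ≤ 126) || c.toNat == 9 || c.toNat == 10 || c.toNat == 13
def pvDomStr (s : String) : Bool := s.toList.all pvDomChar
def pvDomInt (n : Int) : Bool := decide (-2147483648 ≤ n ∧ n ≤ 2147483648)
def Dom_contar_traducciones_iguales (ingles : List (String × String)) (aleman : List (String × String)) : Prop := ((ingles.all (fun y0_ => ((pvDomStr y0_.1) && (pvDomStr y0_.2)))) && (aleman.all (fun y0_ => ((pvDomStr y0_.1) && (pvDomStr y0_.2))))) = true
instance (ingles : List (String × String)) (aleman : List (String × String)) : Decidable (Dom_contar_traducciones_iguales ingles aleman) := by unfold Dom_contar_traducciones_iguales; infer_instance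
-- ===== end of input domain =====

-- B replaces A's per-key hashed membership/lookup loop by a sort-then-merge:
-- both item lists are sorted by key and a two-pointer merge counts matching pairs
-- (alternative algorithm, same result; equivalence about the return value).


-- ===== PORT A =====
def contar_traducciones_iguales (ingles : List (String × String)) (aleman : List (String × String)) : Int :=
  ingles.foldl
    (fun res kv =>
      if (PySem.Dict.mk aleman).contains kv.1 && ((PySem.Dict.mk aleman).get? kv.1 == some kv.2)
      then res + 1 else res)
    0

-- ===== PORT B =====
-- the two-pointer merge loop of Source B, as recursion on the two (sorted) lists
def pvMergeCount : List (String × String) → List (String × String) → Int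
  | [], _ => 0
  | _ :: _, [] => 0
  | x :: xs, y :: ys =>
    if x.1 < y.1 then pvMergeCount xs (y :: ys)
    else if y.1 < x.1 then pvMergeCount (x :: xs) ys
    else (if x.2 == y.2 then 1 else 0) + pvMergeCount xs ys
termination_by xs ys => xs.length + ys.length

def contar_traducciones_iguales_alt (ingles : List (String × String)) (aleman : List (String × String)) : Int :=
  pvMergeCount (PySem.List.sorted ingles Prod.fst) (PySem.List.sorted aleman Prod.fst)

-- ===== PRECONDITION & SPEC =====
-- Pre_ only requires each association list to be a valid dict encoding (no duplicate keys):
-- a Python dict can never contain a duplicate key, so no actual Python input is excluded.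
def Pre_contar_traducciones_iguales (ingles : List (String × String)) (aleman : List (String × String)) : Prop :=
  (ingles.map Prod.fst).Nodup ∧ (aleman.map Prod.fst).Nodup
instance (ingles : List (String × String)) (aleman : List (String × String)) : Decidable (Pre_contar_traducciones_iguales ingles aleman) := by unfold Pre_contar_traducciones_iguales; infer_instance

def pvWitness_contar_traducciones_iguales : (List (String × String)) × (List (String × String)) :=
  ([("cat", "gato"), ("dog", "perro")], [("cat", "gato"), ("sun", "sol")])

def Spec_contar_traducciones_iguales (ingles : List (String × String)) (aleman : List (String × String)) (out : Int) : Prop := out = contar_traducciones_iguales_alt ingles aleman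
instance (ingles : List (String × String)) (aleman : List (String × String)) (out : Int) : Decidable (Spec_contar_traducciones_iguales ingles aleman out) := by unfold Spec_contar_traducciones_iguales; infer_instance

-- ===== CLAIM (what is proved, stated in full; the proofs are below) =====
def Claim_equal_contar_traducciones_iguales : Prop := ∀ (ingles : List (String × String)) (aleman : List (String × String)), Dom_contar_traducciones_iguales ingles aleman → Pre_contar_traducciones_iguales ingles aleman → Spec_contar_traducciones_iguales ingles aleman (contar_traducciones_iguales ingles aleman)

-- ===== LEMMAS AND PROOFS =====
-- A's loop condition is exactly membership of the pair in aleman (keys nodup)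
theorem pair_cond_eq_mem (aleman : List (String × String))
    (ha : (aleman.map Prod.fst).Nodup) (kv : String × String) :
    ((PySem.Dict.mk aleman).contains kv.1 && ((PySem.Dict.mk aleman).get? kv.1 == some kv.2))
      = decide (kv ∈ aleman) := by
  have hkeys : (PySem.Dict.mk aleman).keys.Nodup := by
    simpa [PySem.Dict.keys] using ha
  rw [Bool.eq_iff_iff]
  simp only [Bool.and_eq_true, beq_iff_eq, decide_eq_true_eq]
  constructor
  · rintro ⟨-, hget⟩
    have : (kv.1, kv.2) ∈ (PySem.Dict.mk aleman).items :=
      (PySem.Dict.get?_eq_some_iff_mem_items _ _ _ hkeys).mp hget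
    simpa [PySem.Dict.items] using this
  · intro hmem
    have hitems : (kv.1, kv.2) ∈ (PySem.Dict.mk aleman).items := by
      simpa [PySem.Dict.items] using hmem
    have hget : (PySem.Dict.mk aleman).get? kv.1 = some kv.2 :=
      (PySem.Dict.get?_eq_some_iff_mem_items _ _ _ hkeys).mpr hitems
    exact ⟨by simp [PySem.Dict.contains_eq_isSome_get?, hget], hget⟩

-- the merge on strictly key-increasing lists counts the pairs of xs that occur in ys
theorem pvMergeCount_eq (xs ys : List (String × String))
    (hx : xs.Pairwise (fun a b => a.1 < b.1)) (hy : ys.Pairwise (fun a b => a.1 < b.1)) :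
    pvMergeCount xs ys = ((xs.filter (fun kv => decide (kv ∈ ys))).length : Int) := by
  induction xs, ys using pvMergeCount.induct with
  | case1 ys => simp [pvMergeCount]
  | case2 x xs => simp [pvMergeCount]
  | case3 x xs y ys h1 ih =>
    have hxny : ¬(x = y ∨ x ∈ ys) := by
      rintro (he | hm)
      · exact absurd h1 (by simp [he])
      · have := (List.pairwise_cons.mp hy).1 x hm
        exact absurd (lt_trans h1 this) (lt_irrefl _)
    rw [pvMergeCount, if_pos h1, ih (List.Pairwise.sublist (List.sublist_cons_self x xs) hx) hy]
    simp [List.mem_cons, hxny]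
  | case4 x xs y ys h1 h2 ih =>
    have hcong : ∀ z ∈ x :: xs, (decide (z ∈ y :: ys)) = (decide (z ∈ ys)) := by
      intro z hz
      have hzy : z ≠ y := by
        rcases List.mem_cons.mp hz with h | h
        · subst h; intro he; rw [he] at h2; exact absurd h2 (lt_irrefl _)
        · have := (List.pairwise_cons.mp hx).1 z h
          intro he; rw [he] at this; exact absurd (lt_trans h2 this) (lt_irrefl _)
      simp [List.mem_cons, hzy]
    rw [pvMergeCount, if_neg h1, if_pos h2,
      ih hx (List.Pairwise.sublist (List.sublist_cons_self y ys) hy),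
      List.filter_congr hcong]
  | case5 x xs y ys h1 h2 ih =>
    have hkeq : x.1 = y.1 := le_antisymm (not_lt.mp h2) (not_lt.mp h1)
    have hxys : x ∉ ys := by
      intro hm
      have := (List.pairwise_cons.mp hy).1 x hm
      rw [hkeq] at this; exact absurd this (lt_irrefl _)
    have hcong : ∀ z ∈ xs, (decide (z ∈ y :: ys)) = (decide (z ∈ ys)) := by
      intro z hz
      have hlt := (List.pairwise_cons.mp hx).1 z hz
      have hzy : z ≠ y := by
        intro he; rw [he, hkeq] at hlt; exact absurd hlt (lt_irrefl _)
      simp [List.mem_cons, hzy]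
    have hxmem : (decide (x ∈ y :: ys)) = (x.2 == y.2) := by
      by_cases hv : x.2 = y.2
      · have hxy : x = y := Prod.ext hkeq hv
        simp [List.mem_cons, hxy]
      · have hnm : x ∉ y :: ys := by
          intro hm
          rcases List.mem_cons.mp hm with he | hm'
          · exact hv (by rw [he])
          · exact hxys hm'
        rw [decide_eq_false hnm, eq_comm, beq_eq_false_iff_ne]; exact hv
    rw [pvMergeCount, if_neg h1, if_neg h2,
      ih (List.Pairwise.sublist (List.sublist_cons_self x xs) hx)
         (List.Pairwise.sublist (List.sublist_cons_self y ys) hy)]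
    rw [List.filter_cons, hxmem, List.filter_congr hcong]
    by_cases hv : x.2 = y.2 <;> simp [hv] <;> omega

-- a sorted-by-key list with nodup keys is strictly key-increasing
theorem sorted_pairwise_lt_of_nodup (xs : List (String × String))
    (h : (xs.map Prod.fst).Nodup) :
    (PySem.List.sorted xs Prod.fst).Pairwise (fun a b => a.1 < b.1) := by
  have hle := PySem.List.sorted_pairwise xs Prod.fst
  have hperm : ((PySem.List.sorted xs Prod.fst).map Prod.fst).Perm (xs.map Prod.fst) :=
    (PySem.List.sorted_perm xs Prod.fst false).map Prod.fst
  have hnd : ((PySem.List.sorted xs Prod.fst).map Prod.fst).Nodup := hperm.nodup_iff.mpr h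
  have hne : (PySem.List.sorted xs Prod.fst).Pairwise (fun a b => a.1 ≠ b.1) :=
    (List.pairwise_map).mp hnd
  exact (hle.and hne).imp (fun {a b} hab => lt_of_le_of_ne hab.1 hab.2)

-- ===== VERDICT (by name: the statement is the Claim_ definition above) =====
theorem contar_traducciones_iguales_spec : Claim_equal_contar_traducciones_iguales := by
  intro ingles aleman _ hpre
  obtain ⟨hi, ha⟩ := hpre
  unfold Spec_contar_traducciones_iguales contar_traducciones_iguales contar_traducciones_iguales_alt
  have hfun : (fun (res : Int) (kv : String × String) =>
      if (PySem.Dict.mk aleman).contains kv.1 && ((PySem.Dict.mk aleman).get? kv.1 == some kv.2)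
      then res + 1 else res)
      = (fun (res : Int) (kv : String × String) => if decide (kv ∈ aleman) then res + 1 else res) := by
    funext res kv; rw [pair_cond_eq_mem aleman ha kv]
  rw [hfun]
  rw [PySem.List.foldl_if_add_one, zero_add]
  rw [pvMergeCount_eq _ _ (sorted_pairwise_lt_of_nodup ingles hi)
    (sorted_pairwise_lt_of_nodup aleman ha)]
  rw [← List.countP_eq_length_filter]
  have hcp : List.countP (fun kv => decide (kv ∈ PySem.List.sorted aleman Prod.fst))
      (PySem.List.sorted ingles Prod.fst)
      = List.countP (fun kv => decide (kv ∈ aleman)) (PySem.List.sorted ingles Prod.fst) :=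
    List.countP_congr (fun kv _ => by simp [PySem.List.mem_sorted])
  rw [hcp, (PySem.List.sorted_perm ingles Prod.fst false).countP_eq]
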